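-- pv_equiv track=rewrite | github.com/Rightscar/crs3 | character-creator/services/character_fusion_service.py | _determine_hybrid_role
-- ===== SOURCE A (Python) =====
-- from typing import Dict, Any, List, Tuple, Optional
--
-- def _determine_hybrid_role(characters: List[Dict[str, Any]]) -> str:
--     """Determine role for hybrid character"""
--     roles = [char.get('role', 'Character') for char in characters]
--
--     # Check for dominant roles
--     if 'Protagonist' in roles:
--         return 'Hybrid Protagonist'
--     elif all('Main Character' in role for role in roles):
--         return 'Fusion Main Character'
--     elif 'Supporting Character' in roles:
--         return 'Hybrid Supporting Character'
--
--     return 'Fusion Character'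
-- ===== SOURCE B (Python) =====
-- _ROLE_TABLE = ['Fusion Main Character', 'Fusion Character',
--                'Hybrid Supporting Character', 'Hybrid Protagonist']
--
-- def _rank(role):
--     """Severity rank of one member's role (higher wins)."""
--     if role == 'Protagonist':
--         return 3
--     if role == 'Supporting Character':
--         return 2
--     if 'Main Character' in role:
--         return 0
--     return 1
--
-- def _determine_hybrid_role(characters):
--     """Determine role for hybrid character: rank each member, reduce by max, index a table."""
--     m = max((_rank(c.get('role', 'Character')) for c in characters), default=0)
--     return _ROLE_TABLE[m]
-- ===== Notes on version B (the rewrite author's own statement) =====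
-- stated objective: alternative
-- what changed: Replaces A's if/elif chain over three separate scans (membership, all(), membership) by a rank-and-reduce scheme: each member role is mapped to a numeric severity rank, the ranks are reduced by max, and the result indexes a fixed answer table - no branching on collective predicates at all.
import Mathlib
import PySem

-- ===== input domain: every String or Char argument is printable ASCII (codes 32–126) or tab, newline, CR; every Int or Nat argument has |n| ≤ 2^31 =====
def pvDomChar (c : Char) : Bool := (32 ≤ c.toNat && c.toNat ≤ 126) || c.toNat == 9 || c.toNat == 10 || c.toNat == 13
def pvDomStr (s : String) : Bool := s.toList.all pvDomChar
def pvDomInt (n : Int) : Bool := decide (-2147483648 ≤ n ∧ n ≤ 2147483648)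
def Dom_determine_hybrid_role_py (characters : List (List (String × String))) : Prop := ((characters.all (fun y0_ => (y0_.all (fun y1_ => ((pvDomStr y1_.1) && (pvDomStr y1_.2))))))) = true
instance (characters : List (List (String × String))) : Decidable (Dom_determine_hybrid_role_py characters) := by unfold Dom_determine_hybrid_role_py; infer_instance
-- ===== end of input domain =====

-- B replaces A's if/elif chain of three collective scans by rank-each-member,
-- reduce by max, index a fixed answer table (alternative algorithm, same cost).


-- ===== PORT A =====
def determine_hybrid_role_py (characters : List (List (String × String))) : String :=
  let roles := characters.map (fun char => PySem.Dict.getD (PySem.Dict.mk char) "role" "Character")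
  if roles.contains "Protagonist" then "Hybrid Protagonist"
  else if roles.all (fun role => PySem.Str.isIn "Main Character" role) then "Fusion Main Character"
  else if roles.contains "Supporting Character" then "Hybrid Supporting Character"
  else "Fusion Character"

-- ===== PORT B =====
def pvRank (role : String) : Nat :=
  if role == "Protagonist" then 3
  else if role == "Supporting Character" then 2
  else if PySem.Str.isIn "Main Character" role then 0
  else 1

def determine_hybrid_role_py_alt (characters : List (List (String × String))) : String :=
  let m := (characters.map (fun c => pvRank (PySem.Dict.getD (PySem.Dict.mk c) "role" "Character"))).foldl max 0
  (["Fusion Main Character", "Fusion Character",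
    "Hybrid Supporting Character", "Hybrid Protagonist"]).getD m ""

-- ===== PRECONDITION & SPEC =====
def Spec_determine_hybrid_role_py (characters : List (List (String × String))) (out : String) : Prop := out = determine_hybrid_role_py_alt characters
instance (characters : List (List (String × String))) (out : String) : Decidable (Spec_determine_hybrid_role_py characters out) := by unfold Spec_determine_hybrid_role_py; infer_instance

-- ===== CLAIM =====
def Claim_equal_determine_hybrid_role_py : Prop := ∀ (characters : List (List (String × String))), Dom_determine_hybrid_role_py characters → Spec_determine_hybrid_role_py characters (determine_hybrid_role_py characters)

-- ===== LEMMAS AND PROOFS =====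

-- completed value of the max-reduction, expressed through three list predicates
def pvTarget (roles : List String) : Nat :=
  if roles.any (fun r => r == "Protagonist") then 3
  else if roles.any (fun r => r == "Supporting Character") then 2
  else if roles.all (fun r => PySem.Str.isIn "Main Character" r) then 0
  else 1

theorem pvTarget_cons (r : String) (t : List String) :
    pvTarget (r :: t) = max (pvRank r) (pvTarget t) := by
  unfold pvTarget pvRank
  simp only [List.any_cons, List.all_cons]
  cases h1 : (r == "Protagonist") <;> cases h2 : (r == "Supporting Character") <;>
    rcases Bool.eq_false_or_eq_true (PySem.Str.isIn "Main Character" r) with h3 | h3 <;>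
      simp only [h3, Bool.true_or, Bool.false_or, Bool.true_and, Bool.false_and] <;>
        split_ifs <;> simp_all

theorem pv_rank_fold (roles : List String) (acc : Nat) :
    (roles.map pvRank).foldl max acc = max acc (pvTarget roles) := by
  induction roles generalizing acc with
  | nil => simp [pvTarget]
  | cons r t ih =>
    rw [List.map_cons, List.foldl_cons, ih, pvTarget_cons]
    omega

theorem pv_rank_fold' {α : Type} (l : List α) (f : α → String) (acc : Nat) :
    (l.map (fun c => pvRank (f c))).foldl max acc = max acc (pvTarget (l.map f)) := by
  rw [show l.map (fun c => pvRank (f c)) = (l.map f).map pvRank by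
        rw [List.map_map]; rfl,
      pv_rank_fold]

-- "Supporting Character" does not contain "Main Character" as a substring
theorem pv_supp_not_main : PySem.Str.isIn "Main Character" "Supporting Character" = false := by
  rw [Bool.eq_false_iff]
  intro h
  rw [PySem.Str.isIn_iff_infix] at h
  revert h
  decide

theorem pv_main_no_supp (roles : List String) :
    roles.all (fun r => PySem.Str.isIn "Main Character" r) = true →
    roles.any (fun r => r == "Supporting Character") = false := by
  intro h
  rw [Bool.eq_false_iff]
  intro hs
  rw [List.any_eq_true] at hs
  obtain ⟨r, hr, he⟩ := hs
  rw [List.all_eq_true] at h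
  have hm := h r hr
  rw [beq_iff_eq] at he
  rw [he] at hm
  rw [pv_supp_not_main] at hm
  exact absurd hm (by simp)

theorem pv_contains_any' (roles : List String) (x : String) :
    roles.contains x = roles.any (fun r => r == x) := by
  induction roles with
  | nil => rfl
  | cons h t ih =>
    have hxh : (x == h) = (h == x) := by
      cases hx : (x == h)
      · cases hh : (h == x)
        · rfl
        · rw [beq_iff_eq] at hh
          rw [beq_eq_false_iff_ne] at hx
          exact absurd hh.symm hx
      · cases hh : (h == x)
        · rw [beq_iff_eq] at hx
          rw [beq_eq_false_iff_ne] at hh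
          exact absurd hx.symm hh
        · rfl
    simp only [List.contains_cons, List.any_cons, ih, hxh]

-- ===== VERDICT =====
theorem determine_hybrid_role_py_spec : Claim_equal_determine_hybrid_role_py := by
  intro characters _
  unfold Spec_determine_hybrid_role_py determine_hybrid_role_py determine_hybrid_role_py_alt
  simp only [pv_rank_fold', Nat.zero_max, pv_contains_any']
  generalize (characters.map (fun c => PySem.Dict.getD (PySem.Dict.mk c) "role" "Character")) = roles
  unfold pvTarget
  by_cases hP : roles.any (fun r => r == "Protagonist") = true
  · rw [if_pos hP, if_pos hP]; rfl
  · rw [if_neg hP, if_neg hP]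
    by_cases hM : roles.all (fun r => PySem.Str.isIn "Main Character" r) = true
    · have hS : ¬(roles.any (fun r => r == "Supporting Character") = true) := by
        rw [pv_main_no_supp roles hM]; exact Bool.false_ne_true
      rw [if_pos hM, if_neg hS, if_pos hM]; rfl
    · rw [if_neg hM]
      by_cases hS : roles.any (fun r => r == "Supporting Character") = true
      · rw [if_pos hS, if_pos hS]; rfl
      · rw [if_neg hS, if_neg hS, if_neg hM]; rfl
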